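-- pv_equiv track=rewrite | github.com/Frvx77/kokoloko-bot | legacy/draft_logic.py | get_valid_tiers
-- ===== SOURCE A (Python) =====
-- BASE_PROBABILITIES = {
--     300: 0.03, 260: 0.05, 240: 0.05, 220: 0.07, 200: 0.07,
--     180: 0.10, 160: 0.13, 140: 0.13, 120: 0.10, 100: 0.07,
--     80: 0.07, 60: 0.05, 40: 0.05, 20: 0.03
-- }
--
-- def get_valid_tiers(user_roster, pick_number):
--     """
--     Determines which tiers are allowed for this specific pick.
--     """
--     allowed_tiers = list(BASE_PROBABILITIES.keys())
--
--     # RULE: Max 1 of Tier 300, 260, 240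
--     if any(p['tier'] == 300 for p in user_roster):
--         if 300 in allowed_tiers: allowed_tiers.remove(300)
--
--     if any(p['tier'] == 260 for p in user_roster):
--         if 260 in allowed_tiers: allowed_tiers.remove(260)
--
--     if any(p['tier'] == 240 for p in user_roster):
--         if 240 in allowed_tiers: allowed_tiers.remove(240)
--
--     # RULE: Pity System (Guaranteed 300 on 5th pick if missing)
--     has_300 = any(p['tier'] == 300 for p in user_roster)
--     if pick_number == 5 and not has_300:
--         return [300]  # FORCE Tier 300
--
--     return allowed_tiers
-- ===== SOURCE B (Python) =====
-- BASE_PROBABILITIES = {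
--     300: 0.03, 260: 0.05, 240: 0.05, 220: 0.07, 200: 0.07,
--     180: 0.10, 160: 0.13, 140: 0.13, 120: 0.10, 100: 0.07,
--     80: 0.07, 60: 0.05, 40: 0.05, 20: 0.03
-- }
--
-- def get_valid_tiers(user_roster, pick_number):
--     # Single pass over the roster with an accumulator: drop a capped tier
--     # the first time it is seen, and track the pity flag on the way.
--     allowed = list(BASE_PROBABILITIES)
--     has_300 = False
--     for p in user_roster:
--         t = p['tier']
--         if t == 300:
--             has_300 = True
--         if t in (300, 260, 240) and t in allowed:
--             allowed.remove(t)
--     if pick_number == 5 and not has_300: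
--         return [300]
--     return allowed
-- ===== Notes on version B (the rewrite author's own statement) =====
-- stated objective: alternative
-- what changed: B makes a single pass over the roster with an accumulator, removing a capped tier (300/260/240) the first time it is seen and setting the pity flag on the way, instead of A's four separate any-scans over the roster followed by staged conditional removals.
import Mathlib
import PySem

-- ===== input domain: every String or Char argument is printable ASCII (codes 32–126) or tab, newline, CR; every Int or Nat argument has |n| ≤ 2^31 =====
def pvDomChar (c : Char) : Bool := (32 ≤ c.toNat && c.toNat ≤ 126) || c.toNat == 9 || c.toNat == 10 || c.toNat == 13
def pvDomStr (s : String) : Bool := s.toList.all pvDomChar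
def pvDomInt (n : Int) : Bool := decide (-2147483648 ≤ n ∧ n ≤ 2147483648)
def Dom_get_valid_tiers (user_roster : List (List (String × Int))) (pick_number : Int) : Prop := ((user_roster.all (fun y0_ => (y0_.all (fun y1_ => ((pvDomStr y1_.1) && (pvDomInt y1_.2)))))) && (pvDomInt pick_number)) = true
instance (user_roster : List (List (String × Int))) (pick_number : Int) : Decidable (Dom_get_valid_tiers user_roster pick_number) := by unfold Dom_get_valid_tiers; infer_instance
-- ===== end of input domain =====

-- B replaces A's four separate any-scans + staged conditional removals by ONE pass over the
-- roster with an accumulator (allowed list, pity flag); objective: alternative decomposition.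

-- keys of BASE_PROBABILITIES in insertion order
def baseTiers : List Int := [300, 260, 240, 220, 200, 180, 160, 140, 120, 100, 80, 60, 40, 20]

-- ===== PORT A =====
-- p['tier'] = first match in the association list (some, under Pre_); 'any(p['tier'] == t ...)' becomes this scan
def get_valid_tiers (user_roster : List (List (String × Int))) (pick_number : Int) : List Int :=
  let allowed_tiers := baseTiers
  let allowed_tiers :=
    if user_roster.any (fun p => List.lookup "tier" p == some (300 : Int)) then
      (if allowed_tiers.contains (300 : Int) then allowed_tiers.erase 300 else allowed_tiers)
    else allowed_tiers
  let allowed_tiers :=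
    if user_roster.any (fun p => List.lookup "tier" p == some (260 : Int)) then
      (if allowed_tiers.contains (260 : Int) then allowed_tiers.erase 260 else allowed_tiers)
    else allowed_tiers
  let allowed_tiers :=
    if user_roster.any (fun p => List.lookup "tier" p == some (240 : Int)) then
      (if allowed_tiers.contains (240 : Int) then allowed_tiers.erase 240 else allowed_tiers)
    else allowed_tiers
  let has_300 := user_roster.any (fun p => List.lookup "tier" p == some (300 : Int))
  if pick_number == 5 && !has_300 then [300] else allowed_tiers

-- ===== PORT B =====
-- the loop body: t = p['tier'] (getD 0 only reached outside Pre_, where Python raises KeyError)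
def gvtStep (st : List Int × Bool) (p : List (String × Int)) : List Int × Bool :=
  let t := (List.lookup "tier" p).getD 0
  let has := st.2 || (t == 300)
  if (t == 300 || t == 260 || t == 240) && st.1.contains t then (st.1.erase t, has)
  else (st.1, has)

def get_valid_tiers_alt (user_roster : List (List (String × Int))) (pick_number : Int) : List Int :=
  let st := user_roster.foldl gvtStep (baseTiers, false)
  if pick_number == 5 && !st.2 then [300] else st.1

-- ===== PRECONDITION & SPEC =====
-- Pre_ excludes rosters with an entry lacking the 'tier' key, on which Python A raises KeyError.
def Pre_get_valid_tiers (user_roster : List (List (String × Int))) (pick_number : Int) : Prop :=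
  user_roster.all (fun p => (List.lookup "tier" p).isSome) = true
instance (user_roster : List (List (String × Int))) (pick_number : Int) : Decidable (Pre_get_valid_tiers user_roster pick_number) := by unfold Pre_get_valid_tiers; infer_instance
def pvWitness_get_valid_tiers : (List (List (String × Int))) × Int := ([[("tier", 300)], [("tier", 140)]], 2)

def Spec_get_valid_tiers (user_roster : List (List (String × Int))) (pick_number : Int) (out : List Int) : Prop := out = get_valid_tiers_alt user_roster pick_number
instance (user_roster : List (List (String × Int))) (pick_number : Int) (out : List Int) : Decidable (Spec_get_valid_tiers user_roster pick_number out) := by unfold Spec_get_valid_tiers; infer_instance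

-- ===== CLAIM (what is proved, stated in full; the proofs are below) =====
def Claim_equal_get_valid_tiers : Prop := ∀ (user_roster : List (List (String × Int))) (pick_number : Int), Dom_get_valid_tiers user_roster pick_number → Pre_get_valid_tiers user_roster pick_number → Spec_get_valid_tiers user_roster pick_number (get_valid_tiers user_roster pick_number)

-- ===== LEMMAS AND PROOFS =====

def tval (p : List (String × Int)) : Int := (List.lookup "tier" p).getD 0

def bigT (t : Int) : Bool := t == 300 || t == 260 || t == 240

-- characterization of B's fold: the accumulator ends as a filter of the initial
-- (duplicate-free) list, and the flag as an any-scan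
lemma gvt_fold_char (l : List (List (String × Int))) (init : List Int) (b : Bool)
    (hnd : init.Nodup) :
    l.foldl gvtStep (init, b) =
      (init.filter (fun t => !(bigT t && l.any (fun p => tval p == t))),
       b || l.any (fun p => tval p == 300)) := by
  induction l generalizing init b with
  | nil => simp
  | cons p rest ih =>
    have hstep : gvtStep (init, b) p =
        (if bigT (tval p) && init.contains (tval p)
         then (init.erase (tval p), b || (tval p == 300))
         else (init, b || (tval p == 300))) := rfl
    rw [List.foldl_cons, hstep]
    by_cases hc : (bigT (tval p) && init.contains (tval p)) = true
    · rw [if_pos hc]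
      rw [ih _ _ (hnd.erase _), Prod.mk.injEq]
      refine ⟨?_, ?_⟩
      · rw [hnd.erase_eq_filter (tval p), List.filter_filter]
        apply List.filter_congr
        intro x _
        have hb : bigT (tval p) = true := by
          cases hbt : bigT (tval p)
          · rw [hbt] at hc; simp at hc
          · rfl
        by_cases hx : x = tval p
        · simp [hx, hb]
        · have hne : (tval p == x) = false := by
            rw [beq_eq_false_iff_ne]; exact fun h => hx h.symm
          simp [List.any_cons, hne, hx]
      · simp [List.any_cons, Bool.or_assoc]
    · rw [if_neg hc]
      rw [ih _ _ hnd, Prod.mk.injEq]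
      refine ⟨?_, ?_⟩
      · apply List.filter_congr
        intro x hxmem
        by_cases hx : x = tval p
        · have hmem : tval p ∈ init := hx ▸ hxmem
          have hb : bigT (tval p) = false := by
            by_contra hbt
            rw [Bool.not_eq_false] at hbt
            exact hc (by simp [hbt, hmem])
          simp [hx, hb, List.any_cons]
        · have hne : (tval p == x) = false := by
            rw [beq_eq_false_iff_ne]; exact fun h => hx h.symm
          simp [List.any_cons, hne]
      · simp [List.any_cons, Bool.or_assoc]

-- under Pre_, B's getD-scan for tier t coincides with A's 'lookup == some t' scan
lemma any_tval_eq (l : List (List (String × Int)))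
    (hpre : l.all (fun p => (List.lookup "tier" p).isSome) = true) (t : Int) :
    l.any (fun p => tval p == t) = l.any (fun p => List.lookup "tier" p == some t) := by
  induction l with
  | nil => rfl
  | cons q rest ih =>
    rw [List.all_cons, Bool.and_eq_true] at hpre
    obtain ⟨v, hv⟩ := Option.isSome_iff_exists.mp hpre.1
    have ih' := ih hpre.2
    simp only [tval] at ih'
    simp [List.any_cons, tval, hv, ih']

-- ===== VERDICT (by name: the statement is the Claim_ definition above) =====
theorem get_valid_tiers_spec : Claim_equal_get_valid_tiers := by
  intro user_roster pick_number _hdom hpre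
  unfold Spec_get_valid_tiers get_valid_tiers get_valid_tiers_alt
  have hnd : baseTiers.Nodup := by decide
  rw [gvt_fold_char user_roster baseTiers false hnd]
  unfold Pre_get_valid_tiers at hpre
  simp only [any_tval_eq user_roster hpre]
  cases h3 : user_roster.any (fun p => List.lookup "tier" p == some (300 : Int)) <;>
  cases h2 : user_roster.any (fun p => List.lookup "tier" p == some (260 : Int)) <;>
  cases h4 : user_roster.any (fun p => List.lookup "tier" p == some (240 : Int)) <;>
    simp [baseTiers, bigT, h3, h2, h4, List.erase, List.filter]
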